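-- pv_equiv track=rewrite | github.com/sshpiz/french_conjugato | frame_cards_lib.py | consume_leading_fragment
-- ===== SOURCE A (Python) =====
-- def consume_leading_fragment(text: str, fragments: list[str]) -> tuple[str, str]:
--     suffix = text.lstrip()
--     lowered = suffix.lower()
--     for fragment in sorted(fragments, key=len, reverse=True):
--         if lowered.startswith(fragment):
--             consumed = suffix[:len(fragment)].strip()
--             rest = suffix[len(fragment):].strip()
--             return consumed, rest
--     return "", text.strip()
-- ===== SOURCE B (Python) =====
-- def consume_leading_fragment(text: str, fragments: list[str]) -> tuple[str, str]:
--     suffix = text.lstrip()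
--     lowered = suffix.lower()
--     best_len = -1
--     for fragment in fragments:
--         if lowered.startswith(fragment) and len(fragment) > best_len:
--             best_len = len(fragment)
--     if best_len >= 0:
--         return suffix[:best_len].strip(), suffix[best_len:].strip()
--     return "", text.strip()
-- ===== Notes on version B (the rewrite author's own statement) =====
-- stated objective: simpler
-- what changed: Replaced sort-by-length-then-first-match with a single pass over the fragments in original order that keeps only the running maximum matching length (no sort, and no fragment needs to be kept since the result depends only on the matched length).
import Mathlib
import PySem

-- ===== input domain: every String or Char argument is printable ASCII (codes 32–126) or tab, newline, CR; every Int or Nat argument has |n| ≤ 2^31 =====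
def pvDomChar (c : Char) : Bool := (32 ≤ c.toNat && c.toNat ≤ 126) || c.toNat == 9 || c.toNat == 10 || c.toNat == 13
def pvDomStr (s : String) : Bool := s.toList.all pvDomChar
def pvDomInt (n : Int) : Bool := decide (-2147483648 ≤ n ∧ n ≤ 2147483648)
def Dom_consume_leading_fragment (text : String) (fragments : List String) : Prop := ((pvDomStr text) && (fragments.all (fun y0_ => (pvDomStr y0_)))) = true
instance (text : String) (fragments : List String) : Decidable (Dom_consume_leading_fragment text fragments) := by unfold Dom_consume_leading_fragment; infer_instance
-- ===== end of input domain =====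

-- B replaces A's sort-by-length-then-first-match with a single running-maximum pass
-- over the fragments (only the best matching length is kept); objective: simpler.

-- ===== PORT A =====
def consume_leading_fragment (text : String) (fragments : List String) : String × String :=
  let suffix := PySem.Str.lstrip text
  let lowered := PySem.Str.lower suffix
  match (PySem.List.sorted fragments (fun f => PySem.Str.len f) true).find?
      (fun fragment => PySem.Str.startswith lowered fragment) with
  | some fragment =>
      (PySem.Str.strip (PySem.Str.slice suffix none (some (PySem.Str.len fragment : Int))),
       PySem.Str.strip (PySem.Str.slice suffix (some (PySem.Str.len fragment : Int)) none))
  | none => ("", PySem.Str.strip text)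

-- ===== PORT B =====
def consume_leading_fragment_alt (text : String) (fragments : List String) : String × String :=
  let suffix := PySem.Str.lstrip text
  let lowered := PySem.Str.lower suffix
  let bestLen : Int := fragments.foldl (fun best fragment =>
      if PySem.Str.startswith lowered fragment = true ∧ best < (PySem.Str.len fragment : Int)
      then (PySem.Str.len fragment : Int) else best) (-1)
  if 0 ≤ bestLen then
    (PySem.Str.strip (PySem.Str.slice suffix none (some bestLen)),
     PySem.Str.strip (PySem.Str.slice suffix (some bestLen) none))
  else ("", PySem.Str.strip text)

-- ===== PRECONDITION & SPEC =====
def Spec_consume_leading_fragment (text : String) (fragments : List String) (out : String × String) : Prop := out = consume_leading_fragment_alt text fragments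
instance (text : String) (fragments : List String) (out : String × String) : Decidable (Spec_consume_leading_fragment text fragments out) := by unfold Spec_consume_leading_fragment; infer_instance

-- ===== CLAIM (what is proved, stated in full; the proofs are below) =====
def Claim_equal_consume_leading_fragment : Prop := ∀ (text : String) (fragments : List String), Dom_consume_leading_fragment text fragments → Spec_consume_leading_fragment text fragments (consume_leading_fragment text fragments)

-- ===== LEMMAS AND PROOFS =====

-- length of the found fragment, -1 when none (the only data B's running maximum keeps)
def pvOptLen (o : Option String) : Int :=
  match o with
  | some f => (PySem.Str.len f : Int)
  | none => -1

-- insertBy (descending by length) preserves the "pairwise non-increasing length" invariant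
theorem pv_insertBy_pairwise (x : String) (acc : List String)
    (h : acc.Pairwise (fun a b => PySem.Str.len b ≤ PySem.Str.len a)) :
    (PySem.List.insertBy (fun a b => decide (PySem.Str.len b < PySem.Str.len a)) x acc).Pairwise
      (fun a b => PySem.Str.len b ≤ PySem.Str.len a) := by
  induction acc with
  | nil => simp [PySem.List.insertBy]
  | cons y ys ih =>
    rw [List.pairwise_cons] at h
    obtain ⟨hy, hys⟩ := h
    simp only [PySem.List.insertBy]
    by_cases hlt : PySem.Str.len y < PySem.Str.len x
    · rw [if_pos (by simpa using hlt)]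
      rw [List.pairwise_cons]
      refine ⟨?_, List.pairwise_cons.mpr ⟨hy, hys⟩⟩
      intro b hb
      rcases List.mem_cons.mp hb with rfl | hb'
      · omega
      · have := hy b hb'; omega
    · rw [if_neg (by simpa using hlt)]
      rw [List.pairwise_cons]
      refine ⟨?_, ih hys⟩
      intro b hb
      rcases (PySem.List.mem_insertBy _ x b ys).mp hb with rfl | hb'
      · omega
      · exact hy b hb'

-- one insertion step: the first match of the inserted list is B's running-max update
theorem pv_find_insertBy (p : String → Bool) (x : String) (acc : List String)
    (h : acc.Pairwise (fun a b => PySem.Str.len b ≤ PySem.Str.len a)) :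
    pvOptLen ((PySem.List.insertBy (fun a b => decide (PySem.Str.len b < PySem.Str.len a)) x acc).find? p)
      = if p x = true ∧ pvOptLen (acc.find? p) < (PySem.Str.len x : Int)
        then (PySem.Str.len x : Int) else pvOptLen (acc.find? p) := by
  induction acc with
  | nil =>
    cases hp : p x <;>
      simp [PySem.List.insertBy, List.find?, hp, pvOptLen]; omega
  | cons y ys ih =>
    rw [List.pairwise_cons] at h
    obtain ⟨hy, hys⟩ := h
    simp only [PySem.List.insertBy]
    by_cases hlt : PySem.Str.len y < PySem.Str.len x
    · rw [if_pos (by simpa using hlt)]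
      have hlow : pvOptLen (List.find? p (y :: ys)) < (PySem.Str.len x : Int) := by
        rcases hfind : List.find? p (y :: ys) with _ | b
        · simp only [pvOptLen]
          exact lt_of_lt_of_le (by norm_num) (Int.natCast_nonneg _)
        · have hb := List.mem_of_find?_eq_some hfind
          have hble : PySem.Str.len b ≤ PySem.Str.len y := by
            rcases List.mem_cons.mp hb with rfl | hb'
            · omega
            · exact hy b hb'
          simp only [pvOptLen]
          omega
      cases hp : p x
      · rw [List.find?_cons_of_neg (by simp [hp]), if_neg (by simp)]
      · rw [List.find?_cons_of_pos hp, if_pos ⟨rfl, hlow⟩]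
        simp [pvOptLen]
    · rw [if_neg (by simpa using hlt)]
      cases hq : p y
      · rw [List.find?_cons_of_neg (by simp [hq]), List.find?_cons_of_neg (by simp [hq])]
        exact ih hys
      · rw [List.find?_cons_of_pos hq, List.find?_cons_of_pos hq, if_neg ?_]
        rintro ⟨-, hcon⟩
        simp only [pvOptLen] at hcon
        omega

theorem pv_fold_insert (p : String → Bool) (xs : List String) (acc : List String)
    (h : acc.Pairwise (fun a b => PySem.Str.len b ≤ PySem.Str.len a)) :
    pvOptLen ((xs.foldl (fun acc x => PySem.List.insertBy (fun a b => decide (PySem.Str.len b < PySem.Str.len a)) x acc) acc).find? p)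
      = xs.foldl (fun best x => if p x = true ∧ best < (PySem.Str.len x : Int) then (PySem.Str.len x : Int) else best)
          (pvOptLen (acc.find? p)) := by
  induction xs generalizing acc with
  | nil => rfl
  | cons x xs ih =>
    simp only [List.foldl_cons]
    rw [ih _ (pv_insertBy_pairwise x acc h), pv_find_insertBy p x acc h]

theorem pv_main (p : String → Bool) (xs : List String) :
    pvOptLen ((PySem.List.sorted xs (fun f => PySem.Str.len f) true).find? p)
      = xs.foldl (fun best x => if p x = true ∧ best < (PySem.Str.len x : Int) then (PySem.Str.len x : Int) else best) (-1) := by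
  rw [PySem.List.sorted_rev_eq_foldl_insertBy]
  simpa using pv_fold_insert p xs [] List.Pairwise.nil

-- ===== VERDICT (by name: the statement is the Claim_ definition above) =====
theorem consume_leading_fragment_spec : Claim_equal_consume_leading_fragment := by
  intro text fragments _
  unfold Spec_consume_leading_fragment consume_leading_fragment consume_leading_fragment_alt
  have h := pv_main (fun fragment => PySem.Str.startswith (PySem.Str.lower (PySem.Str.lstrip text)) fragment) fragments
  rcases hf : (PySem.List.sorted fragments (fun f => PySem.Str.len f) true).find?
      (fun fragment => PySem.Str.startswith (PySem.Str.lower (PySem.Str.lstrip text)) fragment) with _ | m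
  · rw [hf] at h
    simp only [pvOptLen] at h
    simp only [hf, ← h]
    norm_num
  · rw [hf] at h
    simp only [pvOptLen] at h
    simp only [hf, ← h]
    have hm : (0 : Int) ≤ (PySem.Str.len m : Int) := Int.natCast_nonneg _
    rw [if_pos hm]
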